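-- pv_equiv track=rewrite | github.com/qualidea1217/text-based-diarization | modeling/speaker-change-detection/sentence-level/sentence-classification/roberta/roberta_scd_sc_test.py | recreate_speaker_label_2sp
-- ===== SOURCE A (Python) =====
-- def recreate_speaker_label_2sp(conversation: list[str], y_pred_list: list, speaker_label: None | list):
--     if len(conversation) - 1 != len(y_pred_list):
--         raise ValueError("Length of y_pred_list should be one less than the length of conversation.")
--     speaker_label_int = [0]
--     for change in y_pred_list:
--         current_speaker = (speaker_label_int[-1] + change) % 2
--         speaker_label_int.append(current_speaker)
--     if speaker_label:
--         seen = {}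
--         occurrence2label = []
--         for label in speaker_label:
--             if label not in seen:
--                 seen[label] = len(seen)
--                 occurrence2label.append(label)
--             if len(occurrence2label) >= 2:
--                 break
--         speaker_label_pred = [occurrence2label[i] for i in speaker_label_int]
--     else:
--         speaker_label_pred = speaker_label_int
--     return speaker_label_pred
-- ===== SOURCE B (Python) =====
-- def recreate_speaker_label_2sp(conversation: list[str], y_pred_list: list, speaker_label: None | list):
--     if len(conversation) - 1 != len(y_pred_list):
--         raise ValueError("Length of y_pred_list should be one less than the length of conversation.")
--     # run-length decomposition: lengths of the maximal same-speaker blocks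
--     runs = [1]
--     for c in y_pred_list:
--         if c % 2:
--             runs.append(1)
--         else:
--             runs[-1] += 1
--     if speaker_label:
--         first = speaker_label[0]
--         labels = [first] + [x for x in speaker_label if x != first][:1]
--     else:
--         labels = [0, 1]
--     return [lab for k, r in enumerate(runs) for lab in [labels[k % 2]] * r]
-- ===== Notes on version B (the rewrite author's own statement) =====
-- stated objective: alternative
-- what changed: A computes a per-sentence running parity list and then maps each parity through the first-two-distinct-labels table; B instead performs a run-length decomposition (lengths of maximal same-speaker blocks, splitting at odd change predictions) and emits alternating label blocks, never materialising a per-sentence parity list.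
-- outside the precondition, e.g. on recreate_speaker_label_2sp(['a'], [], None): A returns [0], B returns [0]; on recreate_speaker_label_2sp(['a', 'b'], [1], ['x', 'x']): A raises IndexError, B raises IndexError
import Mathlib
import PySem

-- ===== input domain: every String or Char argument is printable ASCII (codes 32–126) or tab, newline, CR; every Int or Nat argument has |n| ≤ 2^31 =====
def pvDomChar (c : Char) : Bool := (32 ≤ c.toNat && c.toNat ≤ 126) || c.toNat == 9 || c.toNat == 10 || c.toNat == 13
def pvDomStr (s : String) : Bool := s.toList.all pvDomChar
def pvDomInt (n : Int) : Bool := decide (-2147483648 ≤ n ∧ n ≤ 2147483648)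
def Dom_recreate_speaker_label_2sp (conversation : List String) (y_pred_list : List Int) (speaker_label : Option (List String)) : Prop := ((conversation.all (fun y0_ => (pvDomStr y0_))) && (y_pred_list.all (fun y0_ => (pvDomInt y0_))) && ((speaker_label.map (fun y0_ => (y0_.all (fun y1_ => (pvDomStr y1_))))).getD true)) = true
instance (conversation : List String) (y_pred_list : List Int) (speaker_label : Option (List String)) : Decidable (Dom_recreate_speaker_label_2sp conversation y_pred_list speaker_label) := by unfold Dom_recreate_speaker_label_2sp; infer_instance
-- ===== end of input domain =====

-- B replaces A's per-sentence running-parity list (and dict-based first-two-distinct label scan)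
-- by a run-length decomposition: block lengths split at odd change predictions, then alternating
-- label blocks are emitted; objective: alternative (same cost, different algorithm).

-- ===== PORT A =====
-- the first-two-distinct-labels scan of A (the 'seen' dict / 'occurrence2label' loop with its break)
def aFirstTwo : List String → PySem.Dict String Int → List String → List String
  | [], _, occ => occ
  | l :: rest, seen, occ =>
    let p := if (seen.get? l).isNone then (seen.insert l (seen.size : Int), occ ++ [l]) else (seen, occ)
    if 2 ≤ p.2.length then p.2 else aFirstTwo rest p.1 p.2

def recreate_speaker_label_2sp (conversation : List String) (y_pred_list : List Int) (speaker_label : Option (List String)) : List String :=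
  if (conversation.length : Int) - 1 ≠ (y_pred_list.length : Int) then []  -- Python: raise ValueError (excluded by Pre_)
  else
    let speaker_label_int : List Int :=
      y_pred_list.foldl (fun acc change =>
        acc ++ [PySem.Int.mod (((PySem.List.pyGet? acc (-1)).getD 0) + change) 2]) [0]
    match speaker_label with
    | some l =>
      if l ≠ [] then
        let occurrence2label := aFirstTwo l PySem.Dict.empty []
        speaker_label_int.map (fun i => (PySem.List.pyGet? occurrence2label i).getD "")  -- IndexError case excluded by Pre_
      else []  -- Python returns the int list here (not a list of strings); excluded by Pre_
    | none => []  -- likewise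

-- ===== PORT B =====
-- runs[-1] += 1 of Source B
def incLast : List Int → List Int
  | [] => []
  | [x] => [x + 1]
  | x :: y :: xs => x :: incLast (y :: xs)

def recreate_speaker_label_2sp_alt (conversation : List String) (y_pred_list : List Int) (speaker_label : Option (List String)) : List String :=
  if (conversation.length : Int) - 1 ≠ (y_pred_list.length : Int) then []  -- Python: raise ValueError (excluded by Pre_)
  else
    let runs : List Int :=
      y_pred_list.foldl (fun rs c => if PySem.Int.mod c 2 ≠ 0 then rs ++ [1] else incLast rs) [1]
    match speaker_label with
    | some (z :: rest) =>
      let labels := z :: (((z :: rest).filter (fun x => x != z)).take 1)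
      (PySem.List.enumerate runs).flatMap
        (fun kr => PySem.List.pyRepeat
          [(PySem.List.pyGet? labels (PySem.Int.mod kr.1 2)).getD ""] kr.2)  -- IndexError case excluded by Pre_
    | _ => []  -- Source B uses the int labels 0/1 here; branch excluded by Pre_

-- ===== PRECONDITION & SPEC =====
-- Pre_ excludes: length mismatch (A raises ValueError); falsy speaker_label (None or []), where A returns
-- a list of ints, not of strings; and inputs with an odd change prediction but fewer than two distinct
-- labels, where A raises IndexError.
def Pre_recreate_speaker_label_2sp (conversation : List String) (y_pred_list : List Int) (speaker_label : Option (List String)) : Prop :=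
  conversation.length = y_pred_list.length + 1 ∧
  speaker_label ≠ none ∧
  speaker_label.getD [] ≠ [] ∧
  ((∃ c ∈ y_pred_list, PySem.Int.mod c 2 ≠ 0) →
    ∃ x ∈ speaker_label.getD [], x ≠ (speaker_label.getD []).headI)
instance (conversation : List String) (y_pred_list : List Int) (speaker_label : Option (List String)) : Decidable (Pre_recreate_speaker_label_2sp conversation y_pred_list speaker_label) := by unfold Pre_recreate_speaker_label_2sp; infer_instance

def pvWitness_recreate_speaker_label_2sp : List String × List Int × Option (List String) :=
  (["a", "b"], [1], some ["x", "y"])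

def Spec_recreate_speaker_label_2sp (conversation : List String) (y_pred_list : List Int) (speaker_label : Option (List String)) (out : List String) : Prop := out = recreate_speaker_label_2sp_alt conversation y_pred_list speaker_label
instance (conversation : List String) (y_pred_list : List Int) (speaker_label : Option (List String)) (out : List String) : Decidable (Spec_recreate_speaker_label_2sp conversation y_pred_list speaker_label out) := by unfold Spec_recreate_speaker_label_2sp; infer_instance

-- ===== CLAIM (what is proved, stated in full; the proofs are below) =====
def Claim_equal_recreate_speaker_label_2sp : Prop := ∀ (conversation : List String) (y_pred_list : List Int) (speaker_label : Option (List String)), Dom_recreate_speaker_label_2sp conversation y_pred_list speaker_label → Pre_recreate_speaker_label_2sp conversation y_pred_list speaker_label → Spec_recreate_speaker_label_2sp conversation y_pred_list speaker_label (recreate_speaker_label_2sp conversation y_pred_list speaker_label)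

-- ===== LEMMAS AND PROOFS =====

-- the parity sequence A's loop produces after the seed 0
def pfx : Int → List Int → List Int
  | _, [] => []
  | p, c :: cs => PySem.Int.mod (p + c) 2 :: pfx (PySem.Int.mod (p + c) 2) cs

lemma a_fold (ys : List Int) : ∀ (acc : List Int) (p : Int),
    ys.foldl (fun acc change =>
        acc ++ [PySem.Int.mod (((PySem.List.pyGet? acc (-1)).getD 0) + change) 2]) (acc ++ [p])
      = acc ++ [p] ++ pfx p ys := by
  induction ys with
  | nil => intro acc p; simp [pfx]
  | cons c cs ih =>
    intro acc p
    simp only [List.foldl_cons, PySem.List.pyGet?_neg_one_append_singleton, Option.getD_some, pfx]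
    rw [ih (acc ++ [p]) (PySem.Int.mod (p + c) 2)]
    simp

lemma firstTwo_go (z : String) : ∀ (rest : List String) (seen : PySem.Dict String Int),
    (∀ x, (seen.get? x).isSome ↔ x = z) →
    aFirstTwo rest seen [z] = z :: ((rest.find? (fun x => x != z)).elim [] (fun s => [s])) := by
  intro rest
  induction rest with
  | nil => intro seen _; simp [aFirstTwo]
  | cons x rs ih =>
    intro seen hseen
    rcases hg : seen.get? x with _ | v
    · have hx : ¬ x = z := by have := hseen x; rw [hg] at this; simpa using this
      simp [aFirstTwo, hg, hx]
    · have hx : x = z := (hseen x).1 (by simp [hg])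
      simp only [aFirstTwo, hg]
      simp only [Option.isNone_some, Bool.false_eq_true, if_false, List.length_singleton]
      rw [if_neg (by omega)]
      rw [ih seen hseen]
      simp [hx]

lemma filter_take_one (p : String → Bool) : ∀ (l : List String),
    (l.filter p).take 1 = (l.find? p).elim [] (fun s => [s]) := by
  intro l
  induction l with
  | nil => simp
  | cons x xs ih =>
    by_cases hx : p x = true
    · simp [hx]
    · simp only [List.filter_cons, List.find?_cons, hx]
      simpa using ih

-- reference emission of alternating blocks
def emitRuns (g : Int → String) : Nat → List Int → List String
  | _, [] => []
  | k, r :: rs => List.replicate r.toNat (g ((k % 2 : Nat) : Int)) ++ emitRuns g (k + 1) rs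

lemma enum_flat (g : Int → String) : ∀ (runs : List Int) (s : Nat),
    (PySem.List.enumerate runs (s : Int)).flatMap
      (fun kr => PySem.List.pyRepeat [g (PySem.Int.mod kr.1 2)] kr.2)
      = emitRuns g s runs := by
  intro runs
  induction runs with
  | nil => intro s; simp [PySem.List.enumerate_nil, emitRuns]
  | cons r rsx ih =>
    intro s
    rw [PySem.List.enumerate_cons, List.flatMap_cons,
      show ((s : Int) + 1) = ((s + 1 : Nat) : Int) by push_cast; ring, ih (s + 1)]
    simp [emitRuns, PySem.List.pyRepeat_singleton]

lemma incLast_length : ∀ (rs : List Int), (incLast rs).length = rs.length := by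
  intro rs
  induction rs with
  | nil => simp [incLast]
  | cons x xs ih =>
    cases xs with
    | nil => simp [incLast]
    | cons y ys => simpa [incLast] using ih

lemma incLast_pos : ∀ (rs : List Int), (∀ r ∈ rs, (1:Int) ≤ r) → ∀ r ∈ incLast rs, (1:Int) ≤ r := by
  intro rs
  induction rs with
  | nil => intro _ r h; simp [incLast] at h
  | cons x xs ih =>
    intro hall r h
    cases xs with
    | nil =>
      simp [incLast] at h
      have := hall x (by simp)
      omega
    | cons y ys =>
      simp only [incLast, List.mem_cons] at h
      rcases h with h | h
      · exact h ▸ hall x (by simp)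
      · exact ih (fun r hr => hall r (by simp [hr])) r h

lemma emit_incLast (g : Int → String) : ∀ (rs : List Int) (k : Nat),
    (∀ r ∈ rs, (1:Int) ≤ r) → rs ≠ [] →
    emitRuns g k (incLast rs) = emitRuns g k rs ++ [g (((k + rs.length - 1) % 2 : Nat) : Int)] := by
  intro rs
  induction rs with
  | nil => intro k _ h; exact absurd rfl h
  | cons x xs ih =>
    intro k hall _
    cases xs with
    | nil =>
      have hx : (1:Int) ≤ x := hall x (by simp)
      have ht : (x + 1).toNat = x.toNat + 1 := by omega
      simp only [incLast, emitRuns, ht, List.replicate_succ']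
      simp
    | cons y ys =>
      have hne : (y :: ys) ≠ [] := by simp
      simp only [incLast, emitRuns]
      rw [ih (k + 1) (fun r hr => hall r (by simp [hr])) hne]
      have : k + 1 + (y :: ys).length - 1 = k + (x :: y :: ys).length - 1 := by
        simp [List.length_cons]; omega
      rw [this]
      simp [emitRuns, List.append_assoc]

lemma emit_append_one (g : Int → String) : ∀ (rs : List Int) (k : Nat),
    emitRuns g k (rs ++ [1]) = emitRuns g k rs ++ [g ((k + rs.length) % 2 : Nat)] := by
  intro rs
  induction rs with
  | nil => intro k; simp [emitRuns]
  | cons x xs ih =>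
    intro k
    simp only [List.cons_append, emitRuns]
    rw [ih (k + 1)]
    have : k + 1 + xs.length = k + (x :: xs).length := by simp [List.length_cons]; omega
    rw [this]
    simp [List.append_assoc]

lemma par_step (m : Nat) (c : Int) :
    PySem.Int.mod (((m % 2 : Nat) : Int) + c) 2
      = if PySem.Int.mod c 2 ≠ 0 then (((m + 1) % 2 : Nat) : Int) else ((m % 2 : Nat) : Int) := by
  simp only [PySem.Int.mod_eq_emod_of_pos (show (0:Int) < 2 by norm_num)]
  split_ifs with hc <;> omega

lemma fold_runs0_pre : ∀ r ∈ ([1] : List Int), (1:Int) ≤ r := by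
  intro r hr; simp at hr; omega

lemma fold_runs (g : Int → String) (ys : List Int) : ∀ (rs : List Int) (k : Nat),
    (∀ r ∈ rs, (1:Int) ≤ r) → rs ≠ [] →
    emitRuns g k (ys.foldl (fun rs c => if PySem.Int.mod c 2 ≠ 0 then rs ++ [1] else incLast rs) rs)
      = emitRuns g k rs ++ (pfx (((k + rs.length - 1) % 2 : Nat) : Int) ys).map g := by
  induction ys with
  | nil => intro rs k _ _; simp [pfx]
  | cons c cs ih =>
    intro rs k hall hne
    obtain ⟨r0, rs0, rfl⟩ : ∃ r0 rs0, rs = r0 :: rs0 := by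
      cases rs with
      | nil => exact absurd rfl hne
      | cons a b => exact ⟨a, b, rfl⟩
    have hlen1 : 1 ≤ (r0 :: rs0).length := by simp
    simp only [List.foldl_cons, pfx, par_step]
    by_cases hc : PySem.Int.mod c 2 ≠ 0
    · simp only [if_pos hc]
      rw [ih (r0 :: rs0 ++ [1]) k
        (by intro r hr
            simp at hr
            rcases hr with rfl | h | rfl
            · exact hall r (by simp)
            · exact hall r (by simp [h])
            · omega)
        (List.cons_ne_nil _ _)]
      rw [emit_append_one]
      have h1 : k + (r0 :: rs0 ++ [1]).length - 1 = k + (r0 :: rs0).length := by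
        simp [List.length_append]
      have h2 : k + (r0 :: rs0).length - 1 + 1 = k + (r0 :: rs0).length := by omega
      rw [h1, h2, List.append_assoc]
      simp [List.map_cons]
    · simp only [if_neg hc]
      rw [ih (incLast (r0 :: rs0)) k (incLast_pos _ hall)
        (by intro h; have := incLast_length (r0 :: rs0); rw [h] at this; simp at this)]
      rw [incLast_length, emit_incLast g _ k hall hne, List.append_assoc]
      simp [List.map_cons]

lemma fold_runs0 (g : Int → String) (ys : List Int) :
    emitRuns g 0 (ys.foldl (fun rs c => if PySem.Int.mod c 2 ≠ 0 then rs ++ [1] else incLast rs) [1])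
      = g 0 :: (pfx 0 ys).map g := by
  have hF := fold_runs g ys [1] 0 fold_runs0_pre (by simp)
  simp only [List.length_singleton] at hF
  rw [show ((0 + 1 - 1) % 2 : Nat) = 0 from rfl] at hF
  rw [hF]
  simp [emitRuns]

-- ===== VERDICT (by name: the statement is the Claim_ definition above) =====
theorem recreate_speaker_label_2sp_spec : Claim_equal_recreate_speaker_label_2sp := by
  intro conversation y_pred_list speaker_label _ hpre
  obtain ⟨hlen, hnn, hne, _⟩ := hpre
  obtain ⟨l, rfl⟩ : ∃ l, speaker_label = some l := by
    cases speaker_label with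
    | none => exact absurd rfl hnn
    | some l => exact ⟨l, rfl⟩
  simp only [Option.getD_some] at hne
  obtain ⟨z, rest, rfl⟩ : ∃ z rest, l = z :: rest := by
    cases l with
    | nil => exact absurd rfl hne
    | cons z rest => exact ⟨z, rest, rfl⟩
  unfold Spec_recreate_speaker_label_2sp recreate_speaker_label_2sp recreate_speaker_label_2sp_alt
  rw [if_neg (by omega), if_neg (by omega)]
  dsimp only
  rw [if_pos hne]
  -- the two label tables coincide
  have hocc : aFirstTwo (z :: rest) PySem.Dict.empty []
      = z :: ((rest.find? (fun x => x != z)).elim [] (fun s => [s])) := by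
    have h0 : (PySem.Dict.empty.get? z : Option Int).isNone := by
      simp [PySem.Dict.get?_empty]
    simp only [aFirstTwo]
    rw [if_pos h0]
    simp only [List.nil_append, List.length_singleton]
    rw [if_neg (by omega)]
    apply firstTwo_go
    intro x
    rw [PySem.Dict.get?_insert]
    by_cases hx : x = z <;> simp [hx, PySem.Dict.get?_empty]
  have hlab : z :: (((z :: rest).filter (fun x => x != z)).take 1)
      = z :: ((rest.find? (fun x => x != z)).elim [] (fun s => [s])) := by
    rw [List.filter_cons]
    simp only [bne_self_eq_false, Bool.false_eq_true, if_false]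
    rw [filter_take_one]
  set L := z :: ((rest.find? (fun x => x != z)).elim [] (fun s => [s])) with hL
  set g : Int → String := fun i => (PySem.List.pyGet? L i).getD "" with hg
  -- A side
  have hA := a_fold y_pred_list [] 0
  simp only [List.nil_append] at hA
  rw [hA, hocc, hlab]
  have hB := enum_flat g
    (y_pred_list.foldl (fun rs c => if PySem.Int.mod c 2 ≠ 0 then rs ++ [1] else incLast rs) [1]) 0
  simp only [Nat.cast_zero] at hB
  rw [hB]
  rw [fold_runs0 g y_pred_list]
  rfl
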